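-- pv_equiv track=rewrite | github.com/DarkhanNW/school | hangman_recursion.py | guess_checker
-- ===== SOURCE A (Python) =====
-- def guess_checker(guess, guess_word, word, new_guess_word="", count=0): # Checks if the guess is correct.
--     if count == len(word):
--         return new_guess_word
--     if guess == word[count]:
--         new_guess_word += guess
--     else:
--         new_guess_word += guess_word[count]
--     return guess_checker(guess, guess_word, word, new_guess_word, count+1)
-- ===== SOURCE B (Python) =====
-- def guess_checker(guess, guess_word, word, new_guess_word="", count=0): # Checks if the guess is correct.
--     return new_guess_word + "".join(
--         guess if guess == word[i] else guess_word[i]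
--         for i in range(count, len(word)))
-- ===== Notes on version B (the rewrite author's own statement) =====
-- stated objective: idiomatic
-- what changed: B replaces A's tail recursion that threads a growing string accumulator with a single comprehension over range(count, len(word)) joined once and prefixed with the caller-supplied new_guess_word.
import Mathlib
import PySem

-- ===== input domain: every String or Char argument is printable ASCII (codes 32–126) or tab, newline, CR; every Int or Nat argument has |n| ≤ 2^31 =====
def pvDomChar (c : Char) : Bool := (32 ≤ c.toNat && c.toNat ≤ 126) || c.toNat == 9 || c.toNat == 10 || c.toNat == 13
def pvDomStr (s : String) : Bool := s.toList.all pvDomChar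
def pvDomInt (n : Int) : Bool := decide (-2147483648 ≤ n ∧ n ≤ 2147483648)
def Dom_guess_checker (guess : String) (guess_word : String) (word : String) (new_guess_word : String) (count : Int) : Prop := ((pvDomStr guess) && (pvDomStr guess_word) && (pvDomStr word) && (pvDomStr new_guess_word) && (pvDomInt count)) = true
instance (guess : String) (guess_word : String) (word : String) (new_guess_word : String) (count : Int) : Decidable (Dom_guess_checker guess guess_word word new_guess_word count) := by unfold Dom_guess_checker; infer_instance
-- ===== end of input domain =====

-- B builds the result in one pass as new_guess_word + "".join of a comprehension over range(count, len(word)),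
-- instead of A's tail recursion that threads a growing string accumulator (objective: idiomatic).


-- ===== PORT A =====
-- literal port of A's recursion: `word[count]` / `guess_word[count]` are PySem.Str.pyGet?
-- (none = IndexError; those inputs are excluded by Pre_ below and the port returns the
-- accumulator unchanged there).  The Nat `fuel` is only a structural totality guard:
-- with the fuel guess_checker supplies it is never exhausted on an input where Python returns.
def gcFuel (guess : String) (guess_word : String) (word : String) (new_guess_word : String) (count : Int) : Nat → String
  | 0 => new_guess_word   -- fuel exhausted: unreachable for the fuel chosen below
  | fuel + 1 =>
    if count = PySem.Str.len word then new_guess_word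
    else
      match PySem.Str.pyGet? word count with
      | none => new_guess_word   -- IndexError in Python; outside Pre_
      | some c =>
        if guess = String.ofList [c] then
          gcFuel guess guess_word word (new_guess_word ++ guess) (count + 1) fuel
        else
          match PySem.Str.pyGet? guess_word count with
          | none => new_guess_word   -- IndexError in Python; outside Pre_
          | some d => gcFuel guess guess_word word (new_guess_word ++ String.ofList [d]) (count + 1) fuel

def guess_checker (guess : String) (guess_word : String) (word : String) (new_guess_word : String) (count : Int) : String :=
  gcFuel guess guess_word word new_guess_word count ((PySem.Str.len word - count).toNat + 1)

-- ===== PORT B =====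
-- the comprehension's element at index i: guess if guess == word[i] else guess_word[i]
-- (an out-of-range index is an IndexError in Python — outside Pre_; the port yields "" there)
def altPiece (guess : String) (guess_word : String) (word : String) (i : Int) : String :=
  match PySem.Str.pyGet? word i with
  | none => ""
  | some c =>
    if guess = String.ofList [c] then guess
    else
      match PySem.Str.pyGet? guess_word i with
      | none => ""
      | some d => String.ofList [d]

def guess_checker_alt (guess : String) (guess_word : String) (word : String) (new_guess_word : String) (count : Int) : String :=
  new_guess_word ++
    PySem.Str.join "" ((PySem.List.pyRange count (PySem.Str.len word) 1).map (altPiece guess guess_word word))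

-- ===== PRECONDITION & SPEC =====
-- Pre_ is exactly where Python A returns (no IndexError): count reaches len(word) by +1 steps
-- with every visited word index valid, and guess_word[i] in range at every visited mismatch i.
def Pre_guess_checker (guess : String) (guess_word : String) (word : String) (new_guess_word : String) (count : Int) : Prop :=
  -(PySem.Str.len word) ≤ count ∧ count ≤ PySem.Str.len word ∧
  ∀ i ∈ PySem.List.pyRange count (PySem.Str.len word) 1,
    (PySem.Str.pyGet? word i).map (fun c => String.ofList [c]) = some guess ∨
    (-(PySem.Str.len guess_word) ≤ i ∧ i < PySem.Str.len guess_word)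
instance (guess : String) (guess_word : String) (word : String) (new_guess_word : String) (count : Int) : Decidable (Pre_guess_checker guess guess_word word new_guess_word count) := by unfold Pre_guess_checker; infer_instance

def pvWitness_guess_checker : String × String × String × String × Int := ("a", "_pp_e", "apple", "", 0)

def Spec_guess_checker (guess : String) (guess_word : String) (word : String) (new_guess_word : String) (count : Int) (out : String) : Prop := out = guess_checker_alt guess guess_word word new_guess_word count
instance (guess : String) (guess_word : String) (word : String) (new_guess_word : String) (count : Int) (out : String) : Decidable (Spec_guess_checker guess guess_word word new_guess_word count out) := by unfold Spec_guess_checker; infer_instance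

-- ===== CLAIM (what is proved, stated in full; the proofs are below) =====
def Claim_equal_guess_checker : Prop := ∀ (guess : String) (guess_word : String) (word : String) (new_guess_word : String) (count : Int), Dom_guess_checker guess guess_word word new_guess_word count → Pre_guess_checker guess guess_word word new_guess_word count → Spec_guess_checker guess guess_word word new_guess_word count (guess_checker guess guess_word word new_guess_word count)

-- ===== LEMMAS AND PROOFS =====
lemma str_join_nil_cons (x : String) (xs : List String) :
    PySem.Str.join "" (x :: xs) = x ++ PySem.Str.join "" xs := by
  cases xs <;> simp [PySem.Str.join, PySem.Chars.join, List.intercalate]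

-- with enough fuel, A's recursion from (acc, count) produces acc ++ the join of B's
-- mapped comprehension over range(count, len(word))
lemma gcFuel_eq_join (guess guess_word word : String) (fuel : Nat) :
    ∀ (count : Int) (acc : String),
    (PySem.Str.len word - count).toNat < fuel →
    -(PySem.Str.len word) ≤ count → count ≤ PySem.Str.len word →
    (∀ i ∈ PySem.List.pyRange count (PySem.Str.len word) 1,
      (PySem.Str.pyGet? word i).map (fun c => String.ofList [c]) = some guess ∨
      (-(PySem.Str.len guess_word) ≤ i ∧ i < PySem.Str.len guess_word)) →
    gcFuel guess guess_word word acc count fuel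
      = acc ++ PySem.Str.join ""
          ((PySem.List.pyRange count (PySem.Str.len word) 1).map (altPiece guess guess_word word)) := by
  induction fuel with
  | zero => intro count acc hf; omega
  | succ fuel ih =>
    intro count acc hf hlo hhi hpre
    rw [gcFuel]
    by_cases heq : count = PySem.Str.len word
    · rw [if_pos heq, heq, PySem.List.pyRange_one_eq_nil le_rfl]
      apply String.toList_injective
      simp [PySem.Str.join, PySem.Chars.join, List.intercalate]
    · rw [if_neg heq]
      have hlt : count < PySem.Str.len word := by omega
      have hc : ∃ c, PySem.Str.pyGet? word count = some c := by
        cases h : PySem.Str.pyGet? word count with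
        | none =>
          exfalso
          have := (PySem.List.pyGet?_eq_none_iff (xs := word.toList) (i := count)).mp (by
            simpa [PySem.Str.pyGet?, PySem.Chars.pyGet?] using h)
          simp only [PySem.Raise.InRange, PySem.Str.len_eq] at this hlt hlo
          omega
        | some c => exact ⟨c, rfl⟩
      obtain ⟨c, hgc⟩ := hc
      have hgc' : PySem.List.pyGet? word.toList count = some c := by
        simpa [PySem.Str.pyGet?, PySem.Chars.pyGet?] using hgc
      rw [hgc]
      dsimp only
      have hrange : PySem.List.pyRange count (PySem.Str.len word) 1
          = count :: PySem.List.pyRange (count + 1) (PySem.Str.len word) 1 :=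
        PySem.List.pyRange_one_cons hlt
      have hpre' : ∀ i ∈ PySem.List.pyRange (count + 1) (PySem.Str.len word) 1,
          (PySem.Str.pyGet? word i).map (fun c => String.ofList [c]) = some guess ∨
          (-(PySem.Str.len guess_word) ≤ i ∧ i < PySem.Str.len guess_word) := by
        intro i hi
        exact hpre i (by rw [hrange]; exact List.mem_cons_of_mem _ hi)
      have hf' : (PySem.Str.len word - (count + 1)).toNat < fuel := by omega
      rw [hrange, List.map_cons, str_join_nil_cons]
      by_cases hm : guess = String.ofList [c]
      · rw [if_pos hm, ih (count + 1) (acc ++ guess) hf' (by omega) (by omega) hpre']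
        have hp : altPiece guess guess_word word count = guess := by
          simp [altPiece, hgc', if_pos hm]
        rw [hp]
        apply String.toList_injective
        simp
      · rw [if_neg hm]
        cases hd : PySem.Str.pyGet? guess_word count with
        | none =>
          exfalso
          have hmem : count ∈ PySem.List.pyRange count (PySem.Str.len word) 1 := by
            rw [hrange]; exact List.mem_cons_self
          rcases hpre count hmem with hmatch | hr
          · rw [hgc] at hmatch
            simp only [Option.map_some, Option.some.injEq] at hmatch
            exact hm hmatch.symm
          · have := (PySem.List.pyGet?_eq_none_iff (xs := guess_word.toList) (i := count)).mp (by
              simpa [PySem.Str.pyGet?, PySem.Chars.pyGet?] using hd)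
            simp only [PySem.Raise.InRange, PySem.Str.len_eq] at this hr
            omega
        | some d =>
          dsimp only
          have hd' : PySem.List.pyGet? guess_word.toList count = some d := by
            simpa [PySem.Str.pyGet?, PySem.Chars.pyGet?] using hd
          rw [ih (count + 1) (acc ++ String.ofList [d]) hf' (by omega) (by omega) hpre']
          have hp : altPiece guess guess_word word count = String.ofList [d] := by
            simp [altPiece, hgc', if_neg hm, hd']
          rw [hp]
          apply String.toList_injective
          simp

-- ===== VERDICT (by name: the statement is the Claim_ definition above) =====
theorem guess_checker_spec : Claim_equal_guess_checker := by
  intro guess guess_word word new_guess_word count _hdom hpre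
  unfold Spec_guess_checker guess_checker_alt guess_checker
  exact gcFuel_eq_join guess guess_word word _ count new_guess_word (by omega) hpre.1 hpre.2.1 hpre.2.2
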